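-- pv_equiv track=rewrite | github.com/DBGilles/NemesisRetroWrite | retrowrite/rwtools/nemesis/graph/balance.py | balance_latency_lists
-- ===== SOURCE A (Python) =====
-- import copy
--
-- def balance_latency_lists(tree1_lats, tree2_lats):
--     latencies1 = copy.deepcopy(tree1_lats)
--     latencies2 = copy.deepcopy(tree2_lats)
--     target_latencies = []
--     for a, b in zip(latencies1, latencies2):
--
--         if len(a) == 0:
--             target_latencies.append(b)
--         elif len(b) == 0:
--             target_latencies.append(a)
--         else:
--             # insert nodes into the shorter list, taking into account how instructions
--             # will eventually be added
--             # e.g., you can only insert a triple of 3's (including push, pop, etc)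
--             i = 0
--             while True:
--                 if i >= len(a) and i >= len(b):
--                     break
--                 if i < len(a) and i < len(b) and a[i] == b[i]:
--                     i +=1
--                 elif i >= len(a):
--                     # take the end of b, add it to a
--                     a += b[i:]
--                 elif i >= len(b):
--                     b += a[i:]
--                 else:
--                     # variant van balance, maar er moet altijd 1 eigenschhap gelden
--                     # voor elke serie van latencies van dezelfde waarde (e.g 1,1,1 of 3,3,3,3,3)
--                     # moet het aantal latencies in die series een veelvoud zijn
--                     # van het aantal instructies die je toevoegd wanneer je balanceert
--                     # bijvoorbeeld, voor latency 3, insert 5 instrutions (instr + push + pop + inc SP + dec SP)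
--                     # dus elke serie van 3's moet veelvoud zijn van 1 of van 5
--                     # (is er een meer algemene manier om dit uit te drukken, en te implementeren?)
--                     raise NotImplementedError
--             assert a==b
--             target_latencies.append(a)
--     return target_latencies
-- ===== SOURCE B (Python) =====
-- def balance_latency_lists(tree1_lats, tree2_lats):
--     result = []
--     for a, b in zip(tree1_lats, tree2_lats):
--         n = min(len(a), len(b))
--         if a[:n] != b[:n]:
--             raise NotImplementedError
--         result.append(list(a if len(a) >= len(b) else b))
--     return result
-- ===== Notes on version B (the rewrite author's own statement) =====
-- stated objective: simpler
-- what changed: Replaces A's per-pair mutating while-loop (index walk with in-place `+=` growth of the shorter list and pre-loop empty-list special cases) by a single map over the zip: one slice comparison checks the common prefix, then a copy of the longer list is kept; no mutation, no special cases.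
import Mathlib
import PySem

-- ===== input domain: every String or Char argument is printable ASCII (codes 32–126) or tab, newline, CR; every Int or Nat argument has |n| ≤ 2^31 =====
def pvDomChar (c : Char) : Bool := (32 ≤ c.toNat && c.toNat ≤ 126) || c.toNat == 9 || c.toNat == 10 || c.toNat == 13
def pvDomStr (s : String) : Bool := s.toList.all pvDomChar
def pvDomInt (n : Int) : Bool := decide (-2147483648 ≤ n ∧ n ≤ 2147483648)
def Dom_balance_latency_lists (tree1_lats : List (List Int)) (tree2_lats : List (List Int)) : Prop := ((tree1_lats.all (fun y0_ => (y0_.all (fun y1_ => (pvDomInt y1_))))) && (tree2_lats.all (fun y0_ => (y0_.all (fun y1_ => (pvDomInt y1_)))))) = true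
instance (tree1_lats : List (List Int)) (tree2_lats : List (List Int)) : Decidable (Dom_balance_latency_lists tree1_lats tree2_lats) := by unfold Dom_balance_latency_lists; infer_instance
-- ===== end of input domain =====

-- B replaces A's mutating while-loop (incremental index walk with in-place `+=` growth and
-- pre-loop empty-list special cases) by a single slice-based pass: per zipped pair, check the
-- common prefix with one slice comparison and keep (a copy of) the longer list.  Objective:
-- simpler.  Equivalence is about the RETURN value (A deepcopies its inputs; neither mutates
-- the caller's arguments, but A's result can share structure across duplicates only under
-- Python object aliasing, which lists here cannot express).

-- ===== PORT A =====
-- Python's while loop over mutable a, b, i; `fuel` makes the recursion structural.  The fuel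
-- passed (len a + len b + 2) always exceeds the number of iterations Python performs, so the
-- fuel-0 branch is never reached on any input.  `[]` in the last branch stands for the
-- `raise NotImplementedError` path, which Pre_ excludes.
def pvLoopA : Nat → List Int → List Int → Nat → List Int
  | 0, a, _, _ => a
  | fuel+1, a, b, i =>
    if i ≥ a.length ∧ i ≥ b.length then a
    else if i < a.length ∧ i < b.length ∧ a.getD i 0 = b.getD i 0 then pvLoopA fuel a b (i+1)
    else if i ≥ a.length then pvLoopA fuel (a ++ b.drop i) b i
    else if i ≥ b.length then pvLoopA fuel a (b ++ a.drop i) i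
    else []

def balance_latency_lists (tree1_lats : List (List Int)) (tree2_lats : List (List Int)) : List (List Int) :=
  (tree1_lats.zip tree2_lats).foldl (fun acc p =>
    if p.1.length = 0 then acc ++ [p.2]
    else if p.2.length = 0 then acc ++ [p.1]
    else acc ++ [pvLoopA (p.1.length + p.2.length + 2) p.1 p.2 0]) []

-- ===== PORT B =====
-- B: one map over the zip; slice-compare the common prefix, keep the longer list.
-- `[]` stands for B's `raise NotImplementedError` path, excluded by Pre_.
def balance_latency_lists_alt (tree1_lats : List (List Int)) (tree2_lats : List (List Int)) : List (List Int) :=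
  (tree1_lats.zip tree2_lats).map (fun p =>
    let n := min p.1.length p.2.length
    if p.1.take n = p.2.take n then
      (if p.2.length ≤ p.1.length then p.1 else p.2)
    else [])

-- ===== PRECONDITION & SPEC =====
-- Pre_ excludes exactly the inputs where some zipped pair disagrees on its common prefix:
-- there both A and B raise NotImplementedError.
def Pre_balance_latency_lists (tree1_lats : List (List Int)) (tree2_lats : List (List Int)) : Prop :=
  ∀ p ∈ tree1_lats.zip tree2_lats,
    p.1.take (min p.1.length p.2.length) = p.2.take (min p.1.length p.2.length)
instance (tree1_lats : List (List Int)) (tree2_lats : List (List Int)) : Decidable (Pre_balance_latency_lists tree1_lats tree2_lats) := by unfold Pre_balance_latency_lists; infer_instance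

def pvWitness_balance_latency_lists : List (List Int) × List (List Int) := ([[1, 2], []], [[1], [3, 4]])

def Spec_balance_latency_lists (tree1_lats : List (List Int)) (tree2_lats : List (List Int)) (out : List (List Int)) : Prop := out = balance_latency_lists_alt tree1_lats tree2_lats
instance (tree1_lats : List (List Int)) (tree2_lats : List (List Int)) (out : List (List Int)) : Decidable (Spec_balance_latency_lists tree1_lats tree2_lats out) := by unfold Spec_balance_latency_lists; infer_instance

-- ===== CLAIM (what is proved, stated in full; the proofs are below) =====
def Claim_equal_balance_latency_lists : Prop := ∀ (tree1_lats : List (List Int)) (tree2_lats : List (List Int)), Dom_balance_latency_lists tree1_lats tree2_lats → Pre_balance_latency_lists tree1_lats tree2_lats → Spec_balance_latency_lists tree1_lats tree2_lats (balance_latency_lists tree1_lats tree2_lats)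

-- ===== LEMMAS AND PROOFS =====

-- Once the two lists are equal, the loop just counts i up and breaks, returning the list.
theorem pvLoopA_self (fuel : Nat) : ∀ (a : List Int) (i : Nat), a.length ≤ i + fuel →
    pvLoopA fuel a a i = a := by
  induction fuel with
  | zero => intro a i _; rfl
  | succ fuel ih =>
    intro a i h
    unfold pvLoopA
    by_cases hi : i ≥ a.length
    · rw [if_pos ⟨hi, hi⟩]
    · have hlt : i < a.length := by omega
      rw [if_neg (by omega), if_pos ⟨hlt, hlt, rfl⟩]
      exact ih a (i+1) (by omega)

-- a is a prefix of b: the loop returns a when lengths are equal, else extends a to b.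
theorem pvLoopA_prefix_left (fuel : Nat) : ∀ (a b : List Int) (i : Nat),
    i ≤ a.length → a.length ≤ b.length → a = b.take a.length → b.length + 1 ≤ i + fuel →
    pvLoopA fuel a b i = (if b.length ≤ a.length then a else b) := by
  induction fuel with
  | zero => intro a b i h1 h2 _ h4; omega
  | succ fuel ih =>
    intro a b i h1 h2 hpre h4
    unfold pvLoopA
    by_cases hbrk : i ≥ a.length ∧ i ≥ b.length
    · rw [if_pos hbrk, if_pos (by omega)]
    · rw [if_neg hbrk]
      by_cases hia : i < a.length
      · have hib : i < b.length := by omega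
        have hget : a.getD i 0 = b.getD i 0 := by
          rw [hpre]
          simp [List.getD_eq_getElem?_getD, hia]
        rw [if_pos ⟨hia, hib, hget⟩]
        exact ih a b (i+1) (by omega) h2 hpre (by omega)
      · -- i = a.length < b.length: a += b[i:] makes a equal to b
        have hieq : i = a.length := by omega
        have hib : i < b.length := by omega
        rw [if_neg (by omega), if_pos (by omega)]
        have hext : a ++ b.drop i = b := by
          rw [hieq]; nth_rewrite 1 [hpre]; exact List.take_append_drop _ b
        rw [hext, pvLoopA_self fuel b i (by omega), if_neg (by omega)]

-- b is a proper-or-equal prefix of a: the loop returns a.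
theorem pvLoopA_prefix_right (fuel : Nat) : ∀ (a b : List Int) (i : Nat),
    i ≤ b.length → b.length ≤ a.length → b = a.take b.length → a.length + 1 ≤ i + fuel →
    pvLoopA fuel a b i = a := by
  induction fuel with
  | zero => intro a b i h1 h2 _ h4; omega
  | succ fuel ih =>
    intro a b i h1 h2 hpre h4
    unfold pvLoopA
    by_cases hbrk : i ≥ a.length ∧ i ≥ b.length
    · rw [if_pos hbrk]
    · rw [if_neg hbrk]
      by_cases hib : i < b.length
      · have hia : i < a.length := by omega
        have hget : a.getD i 0 = b.getD i 0 := by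
          rw [hpre]
          simp [List.getD_eq_getElem?_getD, hib]
        rw [if_pos ⟨hia, hib, hget⟩]
        exact ih a b (i+1) (by omega) h2 hpre (by omega)
      · -- i = b.length < a.length: b += a[i:] makes b equal to a
        have hieq : i = b.length := by omega
        have hia : i < a.length := by omega
        rw [if_neg (by omega), if_neg (by omega), if_pos (by omega)]
        have hext : b ++ a.drop i = a := by
          rw [hieq]; nth_rewrite 1 [hpre]; exact List.take_append_drop _ a
        rw [hext, pvLoopA_self fuel a i (by omega)]

-- Per-pair agreement: A's per-pair result equals B's per-pair result under the prefix condition.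
theorem pair_eq (a b : List Int)
    (h : a.take (min a.length b.length) = b.take (min a.length b.length)) :
    (if a.length = 0 then b else if b.length = 0 then a
      else pvLoopA (a.length + b.length + 2) a b 0)
    = (if b.length ≤ a.length then a else b) := by
  by_cases ha : a.length = 0
  · have ha' : a = [] := List.eq_nil_of_length_eq_zero ha
    rw [if_pos ha]
    by_cases hb : b.length ≤ a.length
    · have hb' : b = [] := List.eq_nil_of_length_eq_zero (by omega)
      rw [if_pos hb, ha', hb']
    · rw [if_neg hb]
  · by_cases hb : b.length = 0
    · rw [if_neg ha, if_pos hb, if_pos (by omega)]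
    · rw [if_neg ha, if_neg hb]
      by_cases hab : a.length ≤ b.length
      · have hmin : min a.length b.length = a.length := by omega
        rw [hmin] at h
        simp only [List.take_length] at h
        exact pvLoopA_prefix_left _ a b 0 (by omega) hab h (by omega)
      · have hmin : min a.length b.length = b.length := by omega
        rw [hmin] at h
        simp only [List.take_length] at h
        rw [pvLoopA_prefix_right _ a b 0 (by omega) (by omega) h.symm (by omega),
            if_pos (by omega)]

-- ===== VERDICT (by name: the statement is the Claim_ definition above) =====
theorem balance_latency_lists_spec : Claim_equal_balance_latency_lists := by
  unfold Claim_equal_balance_latency_lists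
  intro t1 t2 _ hpre
  unfold Spec_balance_latency_lists balance_latency_lists balance_latency_lists_alt
  rw [show (fun (acc : List (List Int)) (p : List Int × List Int) =>
        if p.1.length = 0 then acc ++ [p.2]
        else if p.2.length = 0 then acc ++ [p.1]
        else acc ++ [pvLoopA (p.1.length + p.2.length + 2) p.1 p.2 0])
      = (fun acc p => acc ++ [if p.1.length = 0 then p.2 else if p.2.length = 0 then p.1
          else pvLoopA (p.1.length + p.2.length + 2) p.1 p.2 0]) from by
        funext acc p; split_ifs <;> rfl]
  rw [PySem.List.foldl_append_singleton_eq_map]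
  simp only [List.nil_append]
  apply List.map_congr_left
  intro p hp
  have h := hpre p hp
  rw [pair_eq p.1 p.2 h, if_pos h]
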